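-- pv_equiv track=rewrite | github.com/nj-vs-vh/advent-of-code-2023 | utils.py | sparse_to_dense_map
-- ===== SOURCE A (Python) =====
-- from typing import Any, Callable, TypeVar, cast
--
-- T = TypeVar("T")
--
-- Map = list[list[T]]
--
-- Coords = tuple[int, int]
--
-- def init_map(init_value: T, height: int, width: int) -> Map[T]:
--     return [[init_value for _ in range(width)] for _ in range(height)]
--
-- DefaultT = TypeVar("DefaultT")
--
-- def sparse_to_dense_map(
--     coord_values: dict[Coords, T],
--     default: DefaultT,
--     top_left_corner: Coords | None = None,
--     bottom_right_corner: Coords | None = None,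
-- ) -> tuple[Map[T | DefaultT], tuple[int, int]]:
--     if top_left_corner is None:
--         i_min = min(i for i, _ in coord_values.keys())
--         j_min = min(j for _, j in coord_values.keys())
--     else:
--         i_min, j_min = top_left_corner
--     if bottom_right_corner is None:
--         i_max = max(i for i, _ in coord_values.keys())
--         j_max = max(j for _, j in coord_values.keys())
--     else:
--         i_max, j_max = bottom_right_corner
--
--     map_: Map[T | DefaultT] = init_map(
--         default,
--         height=i_max - i_min + 1,
--         width=j_max - j_min + 1,
--     )
--     for (i, j), value in coord_values.items():
--         if i_min <= i <= i_max and j_min <= j <= j_max: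
--             map_[i - i_min][j - j_min] = value
--
--     return map_, (i_min, j_min)
-- ===== SOURCE B (Python) =====
-- def sparse_to_dense_map(
--     coord_values,
--     default,
--     top_left_corner=None,
--     bottom_right_corner=None,
-- ):
--     if top_left_corner is None:
--         i_min = min(i for i, _ in coord_values.keys())
--         j_min = min(j for _, j in coord_values.keys())
--     else:
--         i_min, j_min = top_left_corner
--     if bottom_right_corner is None:
--         i_max = max(i for i, _ in coord_values.keys())
--         j_max = max(j for _, j in coord_values.keys())
--     else:
--         i_max, j_max = bottom_right_corner
--
--     map_ = [
--         [coord_values.get((i, j), default) for j in range(j_min, j_max + 1)]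
--         for i in range(i_min, i_max + 1)
--     ]
--     return map_, (i_min, j_min)
-- ===== Notes on version B (the rewrite author's own statement) =====
-- stated objective: simpler
-- what changed: B gathers each output cell directly from the dict with a nested comprehension over the output rectangle (dict.get with default) instead of allocating a default-filled grid and scattering dict entries into it with bounds-checked in-place assignment.
import Mathlib
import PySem

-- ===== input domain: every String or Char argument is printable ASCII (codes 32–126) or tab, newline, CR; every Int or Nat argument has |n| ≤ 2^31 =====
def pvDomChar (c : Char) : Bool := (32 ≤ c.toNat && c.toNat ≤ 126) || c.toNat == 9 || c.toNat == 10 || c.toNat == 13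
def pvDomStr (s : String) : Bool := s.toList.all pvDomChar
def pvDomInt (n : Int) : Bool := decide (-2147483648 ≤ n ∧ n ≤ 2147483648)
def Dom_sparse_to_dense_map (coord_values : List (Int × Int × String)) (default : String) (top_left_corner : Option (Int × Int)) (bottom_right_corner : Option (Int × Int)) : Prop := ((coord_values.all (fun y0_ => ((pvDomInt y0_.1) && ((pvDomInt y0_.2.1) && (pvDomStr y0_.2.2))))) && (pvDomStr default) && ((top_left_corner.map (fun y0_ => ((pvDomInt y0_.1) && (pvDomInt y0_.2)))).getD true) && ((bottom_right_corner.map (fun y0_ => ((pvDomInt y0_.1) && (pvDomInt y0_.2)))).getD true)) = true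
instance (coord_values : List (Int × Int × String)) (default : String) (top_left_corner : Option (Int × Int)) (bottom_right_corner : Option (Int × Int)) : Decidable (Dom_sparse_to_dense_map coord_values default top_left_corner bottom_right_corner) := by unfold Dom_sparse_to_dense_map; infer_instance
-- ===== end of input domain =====

-- B replaces A's allocate-then-scatter with a direct gather comprehension over the output rectangle (simpler; same bounds code, same ValueError on an empty dict with a missing corner, excluded by Pre_).

-- ===== PORT A =====
-- Both Pythons start with the same four bounds lines; ported once, used by both ports.
-- min(i for i, _ in coord_values.keys()): on an empty dict Python raises ValueError
-- (excluded by Pre_); the .getD 0 arm is unreachable under Pre_.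
def pvIMin (coord_values : List (Int × Int × String)) : Int :=
  (PySem.List.min? (coord_values.map (fun p => p.1)) (fun x => x)).getD 0
def pvJMin (coord_values : List (Int × Int × String)) : Int :=
  (PySem.List.min? (coord_values.map (fun p => p.2.1)) (fun x => x)).getD 0
def pvIMax (coord_values : List (Int × Int × String)) : Int :=
  (PySem.List.max? (coord_values.map (fun p => p.1)) (fun x => x)).getD 0
def pvJMax (coord_values : List (Int × Int × String)) : Int :=
  (PySem.List.max? (coord_values.map (fun p => p.2.1)) (fun x => x)).getD 0

-- init_map: [[init_value for _ in range(width)] for _ in range(height)]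
def pvInitMap (init_value : String) (height width : Int) : List (List String) :=
  (PySem.List.pyRange 0 height 1).map (fun _ =>
    (PySem.List.pyRange 0 width 1).map (fun _ => init_value))

def sparse_to_dense_map (coord_values : List (Int × Int × String)) (default : String) (top_left_corner : Option (Int × Int)) (bottom_right_corner : Option (Int × Int)) : List (List String) × (Int × Int) :=
  let i_min : Int := match top_left_corner with | none => pvIMin coord_values | some c => c.1
  let j_min : Int := match top_left_corner with | none => pvJMin coord_values | some c => c.2
  let i_max : Int := match bottom_right_corner with | none => pvIMax coord_values | some c => c.1
  let j_max : Int := match bottom_right_corner with | none => pvJMax coord_values | some c => c.2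
  let map0 := pvInitMap default (i_max - i_min + 1) (j_max - j_min + 1)
  -- for (i, j), value in coord_values.items(): if in bounds: map_[i - i_min][j - j_min] = value
  -- (both indices are ≥ 0 inside the guard, so .toNat is exact)
  let map_ := coord_values.foldl (fun m e =>
    if i_min ≤ e.1 ∧ e.1 ≤ i_max ∧ j_min ≤ e.2.1 ∧ e.2.1 ≤ j_max then
      m.modify (e.1 - i_min).toNat (fun row => row.set (e.2.1 - j_min).toNat e.2.2)
    else m) map0
  (map_, (i_min, j_min))

-- ===== PORT B =====
-- coord_values.get((i, j), default): a dict has unique keys, so on the association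
-- list the LAST binding of a key is the dict's value (dict building overwrites).
def pvDictGetLast (coord_values : List (Int × Int × String)) (i j : Int) (default : String) : String :=
  (coord_values.foldl (fun acc e => if e.1 = i ∧ e.2.1 = j then some e.2.2 else acc) none).getD default

def sparse_to_dense_map_alt (coord_values : List (Int × Int × String)) (default : String) (top_left_corner : Option (Int × Int)) (bottom_right_corner : Option (Int × Int)) : List (List String) × (Int × Int) :=
  let i_min : Int := match top_left_corner with | none => pvIMin coord_values | some c => c.1
  let j_min : Int := match top_left_corner with | none => pvJMin coord_values | some c => c.2
  let i_max : Int := match bottom_right_corner with | none => pvIMax coord_values | some c => c.1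
  let j_max : Int := match bottom_right_corner with | none => pvJMax coord_values | some c => c.2
  -- [[coord_values.get((i, j), default) for j in range(j_min, j_max + 1)] for i in range(i_min, i_max + 1)]
  let map_ := (PySem.List.pyRange i_min (i_max + 1) 1).map (fun i =>
    (PySem.List.pyRange j_min (j_max + 1) 1).map (fun j =>
      pvDictGetLast coord_values i j default))
  (map_, (i_min, j_min))

-- ===== PRECONDITION & SPEC =====
-- Pre_ excludes only the inputs where A raises: with an omitted corner and an empty
-- dict, min()/max() of an empty sequence raises ValueError (B raises there too).
def Pre_sparse_to_dense_map (coord_values : List (Int × Int × String)) (default : String) (top_left_corner : Option (Int × Int)) (bottom_right_corner : Option (Int × Int)) : Prop :=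
  (top_left_corner = none ∨ bottom_right_corner = none) → coord_values ≠ []
instance (coord_values : List (Int × Int × String)) (default : String) (top_left_corner : Option (Int × Int)) (bottom_right_corner : Option (Int × Int)) : Decidable (Pre_sparse_to_dense_map coord_values default top_left_corner bottom_right_corner) := by unfold Pre_sparse_to_dense_map; infer_instance

def pvWitness_sparse_to_dense_map : (List (Int × Int × String)) × String × (Option (Int × Int)) × (Option (Int × Int)) :=
  ([((0 : Int), (0 : Int), "x"), ((1 : Int), (2 : Int), "y")], ".", none, none)

def Spec_sparse_to_dense_map (coord_values : List (Int × Int × String)) (default : String) (top_left_corner : Option (Int × Int)) (bottom_right_corner : Option (Int × Int)) (out : List (List String) × (Int × Int)) : Prop := out = sparse_to_dense_map_alt coord_values default top_left_corner bottom_right_corner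
instance (coord_values : List (Int × Int × String)) (default : String) (top_left_corner : Option (Int × Int)) (bottom_right_corner : Option (Int × Int)) (out : List (List String) × (Int × Int)) : Decidable (Spec_sparse_to_dense_map coord_values default top_left_corner bottom_right_corner out) := by unfold Spec_sparse_to_dense_map; infer_instance

-- ===== CLAIM (what is proved, stated in full; the proofs are below) =====
def Claim_equal_sparse_to_dense_map : Prop := ∀ (coord_values : List (Int × Int × String)) (default : String) (top_left_corner : Option (Int × Int)) (bottom_right_corner : Option (Int × Int)), Dom_sparse_to_dense_map coord_values default top_left_corner bottom_right_corner → Pre_sparse_to_dense_map coord_values default top_left_corner bottom_right_corner → Spec_sparse_to_dense_map coord_values default top_left_corner bottom_right_corner (sparse_to_dense_map coord_values default top_left_corner bottom_right_corner)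

-- ===== LEMMAS AND PROOFS =====

-- the cell of a nested list at row r, column c (none = out of range)
def pvCell (m : List (List String)) (r c : Nat) : Option String :=
  (m[r]?).bind (fun row => row[c]?)

-- A's scatter step, abstract in the bounds
def pvStep (i_min i_max j_min j_max : Int) (m : List (List String)) (e : Int × Int × String) : List (List String) :=
  if i_min ≤ e.1 ∧ e.1 ≤ i_max ∧ j_min ≤ e.2.1 ∧ e.2.1 ≤ j_max then
    m.modify (e.1 - i_min).toNat (fun row => row.set (e.2.1 - j_min).toNat e.2.2)
  else m

theorem pvStep_length (i_min i_max j_min j_max : Int) (m : List (List String)) (e : Int × Int × String) :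
    (pvStep i_min i_max j_min j_max m e).length = m.length := by
  unfold pvStep; split <;> simp

theorem pvScatter_length (i_min i_max j_min j_max : Int) (cv : List (Int × Int × String)) (m : List (List String)) :
    (cv.foldl (pvStep i_min i_max j_min j_max) m).length = m.length := by
  induction cv generalizing m with
  | nil => rfl
  | cons e t ih => simp [List.foldl, ih, pvStep_length]

theorem pvStep_rowlen (i_min i_max j_min j_max : Int) (m : List (List String)) (e : Int × Int × String) (r : Nat) :
    ((pvStep i_min i_max j_min j_max m e)[r]?).map List.length = (m[r]?).map List.length := by
  unfold pvStep
  split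
  · rw [List.getElem?_modify]
    cases m[r]? <;> simp <;> split <;> simp
  · rfl

theorem pvScatter_rowlen (i_min i_max j_min j_max : Int) (cv : List (Int × Int × String)) (m : List (List String)) (r : Nat) :
    ((cv.foldl (pvStep i_min i_max j_min j_max) m)[r]?).map List.length = (m[r]?).map List.length := by
  induction cv generalizing m with
  | nil => rfl
  | cons e t ih => rw [List.foldl_cons, ih, pvStep_rowlen]

theorem pvStep_cell (i_min i_max j_min j_max : Int) (m : List (List String)) (e : Int × Int × String) (r c : Nat) :
    pvCell (pvStep i_min i_max j_min j_max m e) r c =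
      if i_min ≤ e.1 ∧ e.1 ≤ i_max ∧ j_min ≤ e.2.1 ∧ e.2.1 ≤ j_max ∧ (e.1 - i_min).toNat = r ∧ (e.2.1 - j_min).toNat = c then
        (pvCell m r c).map (fun _ => e.2.2)
      else pvCell m r c := by
  unfold pvStep pvCell
  by_cases hb : i_min ≤ e.1 ∧ e.1 ≤ i_max ∧ j_min ≤ e.2.1 ∧ e.2.1 ≤ j_max
  · rw [if_pos hb, List.getElem?_modify]
    by_cases hr : (e.1 - i_min).toNat = r
    · by_cases hc : (e.2.1 - j_min).toNat = c
      · rw [if_pos ⟨hb.1, hb.2.1, hb.2.2.1, hb.2.2.2, hr, hc⟩]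
        cases hm : m[r]? with
        | none => simp
        | some row =>
          simp only [hr, ite_true, Option.map_eq_map, Option.map_some, Option.bind_some]
          rw [List.getElem?_set, if_pos hc, hc]
          rcases Nat.lt_or_ge c row.length with h | h
          · rw [if_pos h, List.getElem?_eq_getElem h]; rfl
          · rw [if_neg (by omega), List.getElem?_eq_none (by omega)]; rfl
      · rw [if_neg (by intro h; exact hc h.2.2.2.2.2)]
        cases hm : m[r]? with
        | none => simp
        | some row =>
          simp only [hr, ite_true, Option.map_eq_map, Option.map_some, Option.bind_some]
          rw [List.getElem?_set, if_neg hc]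
    · rw [if_neg (by intro h; exact hr h.2.2.2.2.1)]
      cases hm : m[r]? with
      | none => simp
      | some row => simp [hr]
  · rw [if_neg hb]
    rw [if_neg (by intro h; exact hb ⟨h.1, h.2.1, h.2.2.1, h.2.2.2.1⟩)]

theorem pvScatter_cell (i_min i_max j_min j_max : Int) (cv : List (Int × Int × String)) (m : List (List String)) (r c : Nat) :
    pvCell (cv.foldl (pvStep i_min i_max j_min j_max) m) r c =
      cv.foldl (fun (o : Option String) e =>
        if i_min ≤ e.1 ∧ e.1 ≤ i_max ∧ j_min ≤ e.2.1 ∧ e.2.1 ≤ j_max ∧ (e.1 - i_min).toNat = r ∧ (e.2.1 - j_min).toNat = c then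
          o.map (fun _ => e.2.2)
        else o) (pvCell m r c) := by
  induction cv generalizing m with
  | nil => rfl
  | cons e t ih =>
    rw [List.foldl_cons, List.foldl_cons, ih, pvStep_cell]

theorem pvFold_some (P : (Int × Int × String) → Prop) [DecidablePred P] (cv : List (Int × Int × String)) (d : String) :
    cv.foldl (fun (o : Option String) e => if P e then o.map (fun _ => e.2.2) else o) (some d) =
      some (cv.foldl (fun (a : String) e => if P e then e.2.2 else a) d) := by
  induction cv generalizing d with
  | nil => rfl
  | cons e t ih =>
    by_cases h : P e <;> simp [List.foldl_cons, h, ih]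

theorem pvGetLast_fold (cv : List (Int × Int × String)) (i j : Int) (d : String) :
    pvDictGetLast cv i j d =
      cv.foldl (fun (a : String) e => if e.1 = i ∧ e.2.1 = j then e.2.2 else a) d := by
  unfold pvDictGetLast
  suffices h : ∀ (o : Option String),
      (cv.foldl (fun acc e => if e.1 = i ∧ e.2.1 = j then some e.2.2 else acc) o).getD d =
      cv.foldl (fun (a : String) e => if e.1 = i ∧ e.2.1 = j then e.2.2 else a) (o.getD d) by
    exact h none
  induction cv with
  | nil => intro o; rfl
  | cons e t ih =>
    intro o
    by_cases h : e.1 = i ∧ e.2.1 = j <;> simp [List.foldl_cons, h, ih]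

-- the initial grid's cells
theorem pvInitMap_cell (d : String) (H W : Int) (r c : Nat) :
    pvCell (pvInitMap d H W) r c = if r < H.toNat ∧ c < W.toNat then some d else none := by
  unfold pvInitMap pvCell
  by_cases hr : r < H.toNat
  · rw [List.getElem?_map, PySem.List.getElem?_pyRange_one, if_pos (by omega)]
    simp only [Option.map_some, Option.bind_some, List.getElem?_map]
    by_cases hc : c < W.toNat
    · rw [PySem.List.getElem?_pyRange_one, if_pos (by omega), if_pos ⟨hr, hc⟩]
      rfl
    · rw [List.getElem?_eq_none (by rw [PySem.List.length_pyRange_one]; omega), if_neg (by omega)]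
      rfl
  · rw [List.getElem?_eq_none (by rw [List.length_map, PySem.List.length_pyRange_one]; omega), if_neg (by omega)]
    rfl

theorem pvInitMap_length (d : String) (H W : Int) : (pvInitMap d H W).length = H.toNat := by
  unfold pvInitMap
  rw [List.length_map, PySem.List.length_pyRange_one]
  omega

-- core: the scattered grid equals the gathered grid, for arbitrary bounds
theorem pvGrid_eq (cv : List (Int × Int × String)) (d : String) (i_min i_max j_min j_max : Int) :
    cv.foldl (pvStep i_min i_max j_min j_max) (pvInitMap d (i_max - i_min + 1) (j_max - j_min + 1)) =
    (PySem.List.pyRange i_min (i_max + 1) 1).map (fun i =>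
      (PySem.List.pyRange j_min (j_max + 1) 1).map (fun j => pvDictGetLast cv i j d)) := by
  set H : Nat := (i_max - i_min + 1).toNat with hH
  set W : Nat := (j_max - j_min + 1).toNat with hW
  have hlenB : ((PySem.List.pyRange i_min (i_max + 1) 1).map (fun i =>
      (PySem.List.pyRange j_min (j_max + 1) 1).map (fun j => pvDictGetLast cv i j d))).length = H := by
    rw [List.length_map, PySem.List.length_pyRange_one]; omega
  have hlenA : (cv.foldl (pvStep i_min i_max j_min j_max) (pvInitMap d (i_max - i_min + 1) (j_max - j_min + 1))).length = H := by
    rw [pvScatter_length, pvInitMap_length]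
  apply List.ext_getElem?
  intro r
  by_cases hr : r < H
  · -- both rows exist
    have hrlt : r < (cv.foldl (pvStep i_min i_max j_min j_max) (pvInitMap d (i_max - i_min + 1) (j_max - j_min + 1))).length := by omega
    obtain ⟨rowA, hrowA⟩ : ∃ rowA, (cv.foldl (pvStep i_min i_max j_min j_max) (pvInitMap d (i_max - i_min + 1) (j_max - j_min + 1)))[r]? = some rowA :=
      ⟨_, List.getElem?_eq_getElem hrlt⟩
    rw [hrowA]
    -- B's row r
    have hBrow : ((PySem.List.pyRange i_min (i_max + 1) 1).map (fun i =>
        (PySem.List.pyRange j_min (j_max + 1) 1).map (fun j => pvDictGetLast cv i j d)))[r]? =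
        some ((PySem.List.pyRange j_min (j_max + 1) 1).map (fun j => pvDictGetLast cv (i_min + r) j d)) := by
      rw [List.getElem?_map, PySem.List.getElem?_pyRange_one, if_pos (by rw [hH] at hr; omega)]
      rfl
    rw [hBrow]
    congr 1
    -- row lengths
    have hlrA : rowA.length = W := by
      have := pvScatter_rowlen i_min i_max j_min j_max cv (pvInitMap d (i_max - i_min + 1) (j_max - j_min + 1)) r
      rw [hrowA] at this
      have h0 : ((pvInitMap d (i_max - i_min + 1) (j_max - j_min + 1))[r]?).map List.length = some W := by
        unfold pvInitMap
        rw [List.getElem?_map, PySem.List.getElem?_pyRange_one, if_pos (by omega)]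
        simp only [Option.map_some, List.length_map, PySem.List.length_pyRange_one, Option.some.injEq]
        omega
      rw [h0] at this
      simpa using this
    apply List.ext_getElem?
    intro c
    by_cases hc : c < W
    · -- cell values
      have hcellA : pvCell (cv.foldl (pvStep i_min i_max j_min j_max) (pvInitMap d (i_max - i_min + 1) (j_max - j_min + 1))) r c = some (rowA[c]!) := by
        unfold pvCell
        rw [hrowA]
        simp only [Option.bind_some]
        rw [List.getElem?_eq_getElem (by omega), List.getElem!_eq_getElem?_getD, List.getElem?_eq_getElem (by omega)]
        rfl
      rw [pvScatter_cell, pvInitMap_cell, if_pos ⟨by omega, by omega⟩, pvFold_some] at hcellA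
      have hcongr : (cv.foldl (fun (a : String) e =>
          if i_min ≤ e.1 ∧ e.1 ≤ i_max ∧ j_min ≤ e.2.1 ∧ e.2.1 ≤ j_max ∧ (e.1 - i_min).toNat = r ∧ (e.2.1 - j_min).toNat = c then e.2.2 else a) d) =
          (cv.foldl (fun (a : String) e => if e.1 = i_min + (r : Int) ∧ e.2.1 = j_min + (c : Int) then e.2.2 else a) d) := by
        apply PySem.List.foldl_congr_mem
        intro a e he
        have : (i_min ≤ e.1 ∧ e.1 ≤ i_max ∧ j_min ≤ e.2.1 ∧ e.2.1 ≤ j_max ∧ (e.1 - i_min).toNat = r ∧ (e.2.1 - j_min).toNat = c) ↔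
            (e.1 = i_min + (r : Int) ∧ e.2.1 = j_min + (c : Int)) := by
          constructor
          · rintro ⟨h1, h2, h3, h4, h5, h6⟩; omega
          · rintro ⟨h1, h2⟩
            refine ⟨by omega, by omega, by omega, by omega, by omega, by omega⟩
        simp only [this]
      rw [hcongr] at hcellA
      have hcB : ((PySem.List.pyRange j_min (j_max + 1) 1).map (fun j => pvDictGetLast cv (i_min + r) j d))[c]? =
          some (pvDictGetLast cv (i_min + (r : Int)) (j_min + (c : Int)) d) := by
        rw [List.getElem?_map, PySem.List.getElem?_pyRange_one, if_pos (by omega)]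
        rfl
      rw [hcB, List.getElem?_eq_getElem (by omega)]
      rw [pvGetLast_fold]
      have : rowA[c] = rowA[c]! := by
        rw [List.getElem!_eq_getElem?_getD, List.getElem?_eq_getElem (by omega)]; rfl
      rw [this]
      exact Option.some_inj.mpr (Option.some_inj.mp hcellA.symm)
    · rw [List.getElem?_eq_none (by omega), List.getElem?_eq_none (by rw [List.length_map, PySem.List.length_pyRange_one]; omega)]
  · rw [List.getElem?_eq_none (by omega), List.getElem?_eq_none (by omega)]

-- ===== VERDICT (by name: the statement is the Claim_ definition above) =====
theorem sparse_to_dense_map_spec : Claim_equal_sparse_to_dense_map := by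
  intro cv d tl br _ _
  unfold Spec_sparse_to_dense_map sparse_to_dense_map sparse_to_dense_map_alt
  simp only
  refine Prod.ext ?_ rfl
  exact pvGrid_eq cv d _ _ _ _
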